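-- pv_equiv track=rewrite | github.com/paulohsilvapinto/advent-of-code | 2023/day11/task2.py | update_galaxies_positions
-- ===== SOURCE A (Python) =====
-- def update_galaxies_positions(galaxies_positions, rows_to_expand, cols_to_expand):
--     for position_idx, position in enumerate(galaxies_positions):
--         adjusted_row_position = position[0]
--         adjusted_col_position = position[1]
--
--         for row_to_expand in rows_to_expand:
--             if position[0] > row_to_expand:
--                 adjusted_row_position += 1_000_000 - 1
--
--         for col_to_expand in cols_to_expand:
--             if position[1] > col_to_expand:
--                 adjusted_col_position += 1_000_000 - 1
--
--         galaxies_positions[position_idx] = (adjusted_row_position, adjusted_col_position)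
--
--     return galaxies_positions
-- ===== SOURCE B (Python) =====
-- def update_galaxies_positions(galaxies_positions, rows_to_expand, cols_to_expand):
--     step = 1_000_000 - 1
--
--     def axis_offsets(coords, lines):
--         # one sorted merge sweep per axis: offset = (# expansion lines strictly
--         # below the coordinate) * step, found with a single advancing pointer.
--         exp = sorted(lines)
--         off = [0] * len(coords)
--         j = 0
--         for i, x in sorted(enumerate(coords), key=lambda p: p[1]):
--             while j < len(exp) and exp[j] < x:
--                 j += 1
--             off[i] = j * step
--         return off
--
--     row_off = axis_offsets([p[0] for p in galaxies_positions], rows_to_expand)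
--     col_off = axis_offsets([p[1] for p in galaxies_positions], cols_to_expand)
--     galaxies_positions[:] = [(r + row_off[i], c + col_off[i])
--                              for i, (r, c) in enumerate(galaxies_positions)]
--     return galaxies_positions
-- ===== Notes on version B (the rewrite author's own statement) =====
-- stated objective: faster
-- what changed: Replaces the per-galaxy rescan of both expansion lists by a sorted merge sweep per axis: expansion lines and galaxy coordinates are sorted once and a single advancing pointer yields each galaxy's count of lines strictly below it.
import Mathlib
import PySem

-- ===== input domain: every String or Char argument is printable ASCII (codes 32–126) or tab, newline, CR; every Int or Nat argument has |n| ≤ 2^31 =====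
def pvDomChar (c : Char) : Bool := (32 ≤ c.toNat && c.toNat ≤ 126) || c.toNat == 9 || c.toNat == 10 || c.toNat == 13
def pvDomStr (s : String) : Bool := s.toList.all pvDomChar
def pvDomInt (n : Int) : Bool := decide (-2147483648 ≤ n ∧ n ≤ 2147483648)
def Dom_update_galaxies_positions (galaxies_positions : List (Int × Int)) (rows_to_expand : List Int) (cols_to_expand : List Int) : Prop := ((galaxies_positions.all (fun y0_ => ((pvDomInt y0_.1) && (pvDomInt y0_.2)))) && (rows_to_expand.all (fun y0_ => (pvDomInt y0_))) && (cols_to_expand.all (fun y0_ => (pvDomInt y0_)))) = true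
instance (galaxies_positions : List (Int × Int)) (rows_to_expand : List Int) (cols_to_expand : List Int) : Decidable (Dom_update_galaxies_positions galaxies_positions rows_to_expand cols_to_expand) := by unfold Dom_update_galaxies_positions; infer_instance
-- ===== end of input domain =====

-- B replaces A's per-galaxy rescan of both expansion lists by one sorted merge sweep
-- per axis (objective: faster). Both programs mutate the argument list in place in
-- the same observable way (element overwrite / slice assignment) and return it.

-- ===== PORT A =====
def update_galaxies_positions (galaxies_positions : List (Int × Int)) (rows_to_expand : List Int) (cols_to_expand : List Int) : List (Int × Int) :=
  (PySem.List.enumerate galaxies_positions 0).foldl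
    (fun acc p =>
      let adjusted_row_position :=
        rows_to_expand.foldl (fun a row_to_expand =>
          if p.2.1 > row_to_expand then a + (1000000 - 1) else a) p.2.1
      let adjusted_col_position :=
        cols_to_expand.foldl (fun a col_to_expand =>
          if p.2.2 > col_to_expand then a + (1000000 - 1) else a) p.2.2
      PySem.List.pySetD acc p.1 (adjusted_row_position, adjusted_col_position))
    galaxies_positions

-- ===== PORT B =====
-- the inner 'while j < len(exp) and exp[j] < x: j += 1' loop of Source B
def pvWhileAdv (exp : List Int) (x : Int) (j : Nat) : Nat :=
  if h : j < exp.length then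
    if exp[j] < x then pvWhileAdv exp x (j + 1) else j
  else j
termination_by exp.length - j

-- the 'for i, x in sorted(enumerate(coords), key=...)' sweep of Source B, state (j, off)
def pvSweep (exp : List Int) : List (Int × Int) → Nat → List Int → List Int
  | [], _, off => off
  | p :: rest, j, off =>
      let j' := pvWhileAdv exp p.2 j
      pvSweep exp rest j' (PySem.List.pySetD off p.1 ((j' : Int) * (1000000 - 1)))

def pvAxisOffsets (coords : List Int) (lines : List Int) : List Int :=
  let exp := PySem.List.sorted lines (fun e => e) false
  pvSweep exp (PySem.List.sorted (PySem.List.enumerate coords 0) (fun p => p.2) false) 0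
    (List.replicate coords.length 0)

def update_galaxies_positions_alt (galaxies_positions : List (Int × Int)) (rows_to_expand : List Int) (cols_to_expand : List Int) : List (Int × Int) :=
  let row_off := pvAxisOffsets (galaxies_positions.map (fun p => p.1)) rows_to_expand
  let col_off := pvAxisOffsets (galaxies_positions.map (fun p => p.2)) cols_to_expand
  (PySem.List.enumerate galaxies_positions 0).map (fun p =>
    (p.2.1 + PySem.List.pyGetD row_off p.1 0, p.2.2 + PySem.List.pyGetD col_off p.1 0))

-- ===== PRECONDITION & SPEC =====
def Spec_update_galaxies_positions (galaxies_positions : List (Int × Int)) (rows_to_expand : List Int) (cols_to_expand : List Int) (out : List (Int × Int)) : Prop := out = update_galaxies_positions_alt galaxies_positions rows_to_expand cols_to_expand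
instance (galaxies_positions : List (Int × Int)) (rows_to_expand : List Int) (cols_to_expand : List Int) (out : List (Int × Int)) : Decidable (Spec_update_galaxies_positions galaxies_positions rows_to_expand cols_to_expand out) := by unfold Spec_update_galaxies_positions; infer_instance

-- ===== CLAIM (what is proved, stated in full; the proofs are below) =====
def Claim_equal_update_galaxies_positions : Prop := ∀ (galaxies_positions : List (Int × Int)) (rows_to_expand : List Int) (cols_to_expand : List Int), Dom_update_galaxies_positions galaxies_positions rows_to_expand cols_to_expand → Spec_update_galaxies_positions galaxies_positions rows_to_expand cols_to_expand (update_galaxies_positions galaxies_positions rows_to_expand cols_to_expand)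

-- ===== LEMMAS AND PROOFS =====

-- the common closed form: offset added to coordinate x by expansion lines `lines`
def pvCnt (lines : List Int) (x : Int) : Int :=
  ((lines.countP (fun e => decide (e < x)) : Nat) : Int) * (1000000 - 1)

def pvF (rows cols : List Int) (p : Int × Int) : Int × Int :=
  (p.1 + pvCnt rows p.1, p.2 + pvCnt cols p.2)

lemma pv_set_len_append (pre t : List (Int × Int)) (x v : Int × Int) :
    (pre ++ x :: t).set pre.length v = pre ++ v :: t := by
  induction pre with
  | nil => simp
  | cons a pre ih => simp [ih]

lemma pv_foldl_enum_set (f : (Int × Int) → (Int × Int)) :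
    ∀ (l pre : List (Int × Int)),
      (PySem.List.enumerate l (pre.length : Int)).foldl
        (fun acc p => PySem.List.pySetD acc p.1 (f p.2)) (pre ++ l) = pre ++ l.map f := by
  intro l
  induction l with
  | nil => intro pre; simp [PySem.List.enumerate]
  | cons x t ih =>
      intro pre
      rw [PySem.List.enumerate_cons, List.foldl_cons]
      have h1 : PySem.List.pySetD (pre ++ x :: t) ((pre.length : Int)) (f x) = pre ++ f x :: t := by
        rw [PySem.List.pySetD_natCast, pv_set_len_append]
      rw [h1]
      have h2 : ((pre.length : Int) + 1) = (((pre ++ [f x]).length : Nat) : Int) := by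
        simp
      have h3 : pre ++ f x :: t = (pre ++ [f x]) ++ t := by simp
      rw [h2, h3, ih (pre ++ [f x])]
      simp

lemma pvA_elem (lines : List Int) (x : Int) :
    lines.foldl (fun a e => if x > e then a + (1000000 - 1) else a) x = x + pvCnt lines x := by
  rw [PySem.List.foldl_ite_eq_foldl_filter (p := fun e => x > e) (f := fun a _ => a + (1000000 - 1))]
  rw [PySem.List.foldl_add (g := fun _ => (1000000 - 1 : Int))]
  rw [PySem.List.sum_map_const_int]
  rw [← List.countP_eq_length_filter]
  simp only [pvCnt, gt_iff_lt]

lemma pvA_eq (g : List (Int × Int)) (rows cols : List Int) :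
    update_galaxies_positions g rows cols = g.map (pvF rows cols) := by
  unfold update_galaxies_positions
  have hf : (fun (acc : List (Int × Int)) (p : Int × (Int × Int)) =>
      let ar := rows.foldl (fun a e => if p.2.1 > e then a + (1000000 - 1) else a) p.2.1
      let ac := cols.foldl (fun a e => if p.2.2 > e then a + (1000000 - 1) else a) p.2.2
      PySem.List.pySetD acc p.1 (ar, ac))
      = fun acc p => PySem.List.pySetD acc p.1 (pvF rows cols p.2) := by
    funext acc p
    simp only [pvA_elem, pvF]
  rw [hf]
  have := pv_foldl_enum_set (pvF rows cols) g []
  simpa using this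

-- pvWhileAdv on a sorted list, started below a prefix of elements < x, lands on countP (< x)
lemma pv_countP_eq_of_block (exp : List Int) (x : Int)
    (j : Nat) (hj : j ≤ exp.length)
    (hlow : ∀ k, (hk : k < exp.length) → k < j → exp[k] < x)
    (hhi : ∀ k, (hk : k < exp.length) → j ≤ k → ¬ exp[k] < x) :
    exp.countP (fun e => decide (e < x)) = j := by
  conv_lhs => rw [← List.take_append_drop j exp]
  rw [List.countP_append]
  have h1 : (exp.take j).countP (fun e => decide (e < x)) = j := by
    rw [List.countP_eq_length.mpr ?_, List.length_take]
    · omega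
    · intro a ha
      rcases List.mem_iff_getElem.mp ha with ⟨i, hi, rfl⟩
      have hi' : i < j := by rw [List.length_take] at hi; omega
      rw [List.getElem_take]
      exact decide_eq_true (hlow i (by rw [List.length_take] at hi; omega) hi')
  have h2 : (exp.drop j).countP (fun e => decide (e < x)) = 0 := by
    rw [List.countP_eq_zero]
    intro a ha
    rcases List.mem_iff_getElem.mp ha with ⟨i, hi, rfl⟩
    rw [List.getElem_drop]
    have hji : j + i < exp.length := by rw [List.length_drop] at hi; omega
    simpa using hhi (j + i) hji (by omega)
  omega

lemma pvWhileAdv_spec (exp : List Int) (x : Int) (j : Nat)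
    (hs : exp.Pairwise (· ≤ ·)) (hj : j ≤ exp.length)
    (hlow : ∀ k, (hk : k < exp.length) → k < j → exp[k] < x) :
    pvWhileAdv exp x j = exp.countP (fun e => decide (e < x)) := by
  rw [pvWhileAdv]
  by_cases h : j < exp.length
  · by_cases hx : exp[j] < x
    · simp only [h, hx, dite_true, if_true]
      exact pvWhileAdv_spec exp x (j + 1) hs h
        (fun k hk hkj => by
          rcases Nat.lt_succ_iff_lt_or_eq.mp hkj with h' | h'
          · exact hlow k hk h'
          · subst h'; exact hx)
    · simp only [h, hx, dite_true, if_false]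
      refine (pv_countP_eq_of_block exp x j hj hlow ?_).symm
      intro k hk hjk hck
      have h1 : exp[j] ≤ exp[k] := by
        rcases Nat.lt_or_ge j k with h' | h'
        · exact (List.pairwise_iff_getElem.mp hs) j k h hk h'
        · have : j = k := le_antisymm hjk h'
          subst this; exact le_refl _
      exact hx (lt_of_le_of_lt h1 hck)
  · simp only [h, dite_false]
    have hje : j = exp.length := le_antisymm hj (Nat.le_of_not_lt h)
    subst hje
    refine (pv_countP_eq_of_block exp x exp.length (le_refl _) hlow ?_).symm
    intro k hk hjk; omega
termination_by exp.length - j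

-- below countP (< x) in a sorted list, every element is < x
lemma pv_getElem_lt_of_lt_countP (exp : List Int) (x : Int)
    (hs : exp.Pairwise (· ≤ ·)) (k : Nat) (hk : k < exp.length)
    (hkc : k < exp.countP (fun e => decide (e < x))) : exp[k] < x := by
  by_contra hx
  have hle : exp.countP (fun e => decide (e < x)) ≤ k := by
    conv_lhs => rw [← List.take_append_drop k exp, List.countP_append]
    have h2 : (exp.drop k).countP (fun e => decide (e < x)) = 0 := by
      rw [List.countP_eq_zero]
      intro a ha
      rcases List.mem_iff_getElem.mp ha with ⟨i, hi, rfl⟩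
      rw [List.getElem_drop]
      have hki : k + i < exp.length := by rw [List.length_drop] at hi; omega
      have hmono : exp[k] ≤ exp[k + i] := by
        rcases Nat.eq_zero_or_pos i with h0 | h0
        · subst h0; simp
        · exact (List.pairwise_iff_getElem.mp hs) k (k + i) hk hki (by omega)
      simp only [decide_eq_true_eq, not_lt]
      exact le_trans (not_lt.mp hx) hmono
    have h1 : (exp.take k).countP (fun e => decide (e < x)) ≤ k := by
      calc (exp.take k).countP (fun e => decide (e < x)) ≤ (exp.take k).length :=
            List.countP_le_length
        _ ≤ k := by rw [List.length_take]; omega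
    omega
  omega

lemma pvSweep_spec (exp : List Int) (hs : exp.Pairwise (· ≤ ·)) :
    ∀ (pairs : List (Int × Int)) (j : Nat) (off : List Int),
      j ≤ exp.length →
      pairs.Pairwise (fun p q => p.2 ≤ q.2) →
      (∀ k, (hk : k < exp.length) → k < j → ∀ p ∈ pairs, exp[k] < p.2) →
      pvSweep exp pairs j off
        = pairs.foldl (fun o p =>
            PySem.List.pySetD o p.1
              ((exp.countP (fun e => decide (e < p.2)) : Int) * (1000000 - 1))) off := by
  intro pairs
  induction pairs with
  | nil => intro j off _ _ _; rfl
  | cons p rest ih =>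
      intro j off hj hpw hinv
      have hhead := List.pairwise_cons.mp hpw
      have hj' : pvWhileAdv exp p.2 j = exp.countP (fun e => decide (e < p.2)) :=
        pvWhileAdv_spec exp p.2 j hs hj
          (fun k hk hkj => hinv k hk hkj p (List.mem_cons_self ..))
      show pvSweep exp rest (pvWhileAdv exp p.2 j)
          (PySem.List.pySetD off p.1 (((pvWhileAdv exp p.2 j : Nat) : Int) * (1000000 - 1))) = _
      rw [hj', List.foldl_cons]
      exact ih (exp.countP (fun e => decide (e < p.2))) _
        List.countP_le_length
        hhead.2
        (fun k hk hkc q hq =>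
          lt_of_lt_of_le (pv_getElem_lt_of_lt_countP exp p.2 hs k hk hkc) (hhead.1 q hq))

lemma pvFoldSet_length (G : Int → Int) :
    ∀ (pairs : List (Int × Int)) (off : List Int),
      (pairs.foldl (fun o p => PySem.List.pySetD o p.1 (G p.2)) off).length = off.length := by
  intro pairs
  induction pairs with
  | nil => intro off; rfl
  | cons p rest ih => intro off; rw [List.foldl_cons, ih]; exact PySem.List.length_pySetD ..

lemma pvFoldSet_get (G : Int → Int) (coords : List Int) :
    ∀ (pairs : List (Int × Int)) (off : List Int),
      off.length = coords.length →
      (∀ p ∈ pairs, ∃ k, ∃ hk : k < coords.length, p = ((k : Int), coords[k])) →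
      (pairs.map Prod.fst).Nodup →
      ∀ m, m < coords.length →
        (pairs.foldl (fun o p => PySem.List.pySetD o p.1 (G p.2)) off)[m]?
          = if ((m : Int)) ∈ pairs.map Prod.fst then some (G (coords.getD m 0)) else off[m]? := by
  intro pairs
  induction pairs with
  | nil => intro off _ _ _ m _; simp
  | cons p rest ih =>
      intro off hlen hshape hnd m hm
      rcases hshape p (List.mem_cons_self ..) with ⟨k, hk, rfl⟩
      rw [List.foldl_cons, PySem.List.pySetD_natCast]
      have hnd' : (rest.map Prod.fst).Nodup := by
        simpa using (List.nodup_cons.mp (by simpa using hnd)).2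
      rw [ih (off.set k (G coords[k])) (by simp [hlen])
            (fun q hq => hshape q (List.mem_cons_of_mem _ hq)) hnd' m hm]
      by_cases hmem : ((m : Int)) ∈ rest.map Prod.fst
      · rw [if_pos hmem, if_pos (by simp [hmem])]
      · rw [if_neg hmem, List.getElem?_set]
        by_cases hkm : k = m
        · subst hkm
          rw [if_pos rfl, if_pos (by omega : k < off.length) ]
          rw [if_pos (by simp)]
          rw [List.getD_eq_getElem _ _ hk]
        · rw [if_neg hkm]
          rw [if_neg (by
            simp only [List.map_cons, List.mem_cons]
            push Not
            exact ⟨fun h => hkm (by exact_mod_cast h.symm), hmem⟩)]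


lemma pvAxisOffsets_spec (coords lines : List Int) :
    pvAxisOffsets coords lines = coords.map (fun x => pvCnt lines x) := by
  unfold pvAxisOffsets
  have hs : (PySem.List.sorted lines (fun e => e) false).Pairwise (· ≤ ·) :=
    PySem.List.sorted_pairwise lines (fun e => e)
  have hpw : (PySem.List.sorted (PySem.List.enumerate coords 0) (fun p => p.2) false).Pairwise
      (fun p q => p.2 ≤ q.2) := PySem.List.sorted_pairwise _ _
  rw [pvSweep_spec _ hs _ 0 _ (Nat.zero_le _) hpw
      (fun k hk hk0 p hp => absurd hk0 (Nat.not_lt_zero k))]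
  have hcnt : ∀ x : Int, (PySem.List.sorted lines (fun e => e) false).countP
      (fun e => decide (e < x)) = lines.countP (fun e => decide (e < x)) :=
    fun x => (PySem.List.sorted_perm lines (fun e => e) false).countP_eq _
  have hshape : ∀ p ∈ PySem.List.sorted (PySem.List.enumerate coords 0) (fun p => p.2) false,
      ∃ k, ∃ hk : k < coords.length, p = ((k : Int), coords[k]) := by
    intro p hp
    rcases (PySem.List.mem_enumerate_iff coords 0 p).mp
        ((PySem.List.mem_sorted ..).mp hp) with ⟨k, hk, rfl⟩
    exact ⟨k, hk, by simp⟩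
  have hpermf : ((PySem.List.sorted (PySem.List.enumerate coords 0) (fun p => p.2) false).map
      Prod.fst).Perm ((PySem.List.enumerate coords 0).map Prod.fst) :=
    (PySem.List.sorted_perm ..).map _
  have hnd : ((PySem.List.sorted (PySem.List.enumerate coords 0) (fun p => p.2) false).map
      Prod.fst).Nodup := by
    rw [hpermf.nodup_iff]
    have : (PySem.List.enumerate coords 0).map Prod.fst
        = PySem.List.pyRange 0 (0 + (coords.length : Int)) := by
      simpa using PySem.List.map_fst_enumerate coords 0
    rw [this, zero_add, PySem.List.pyRange_zero_natCast]
    exact List.nodup_range.map (fun a b h => by exact_mod_cast h)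
  apply List.ext_getElem?
  intro m
  by_cases hm : m < coords.length
  · rw [pvFoldSet_get
      (fun x => ((PySem.List.sorted lines (fun e => e) false).countP
        (fun e => decide (e < x)) : Int) * (1000000 - 1)) coords _ _
      (by simp) hshape hnd m hm]
    have hmemf : ((m : Int)) ∈ (PySem.List.sorted (PySem.List.enumerate coords 0)
        (fun p => p.2) false).map Prod.fst := by
      rw [hpermf.mem_iff]
      have : (PySem.List.enumerate coords 0).map Prod.fst
          = PySem.List.pyRange 0 (0 + (coords.length : Int)) := by
        simpa using PySem.List.map_fst_enumerate coords 0
      rw [this]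
      rw [PySem.List.mem_pyRange_one]
      constructor
      · exact Int.natCast_nonneg m
      · rw [zero_add]; exact_mod_cast hm
    rw [if_pos hmemf]
    rw [List.getElem?_eq_getElem (by simpa using hm)]
    rw [List.getD_eq_getElem _ _ hm]
    simp only [List.getElem_map, hcnt, pvCnt]
  · have h1 : coords.length ≤ m := Nat.le_of_not_lt hm
    rw [List.getElem?_eq_none (by
      rw [pvFoldSet_length (fun x => ((PySem.List.sorted lines (fun e => e) false).countP
        (fun e => decide (e < x)) : Int) * (1000000 - 1))]
      simpa using h1)]
    rw [List.getElem?_eq_none (by simpa using h1)]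

lemma pvAlt_eq (g : List (Int × Int)) (rows cols : List Int) :
    update_galaxies_positions_alt g rows cols = g.map (pvF rows cols) := by
  unfold update_galaxies_positions_alt
  rw [pvAxisOffsets_spec, pvAxisOffsets_spec]
  apply List.ext_getElem?
  intro m
  by_cases hm : m < g.length
  · rw [List.getElem?_eq_getElem (by simpa using hm), List.getElem?_eq_getElem (by simpa using hm)]
    simp only [List.getElem_map, PySem.List.getElem_enumerate]
    have hr : PySem.List.pyGetD ((g.map (fun p => p.1)).map (fun x => pvCnt rows x)) ((0 : Int) + (m : Int)) 0
        = pvCnt rows (g[m].1) := by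
      rw [zero_add, PySem.List.pyGetD_natCast]
      rw [List.getD_eq_getElem _ _ (by simpa using hm)]
      simp
    have hc : PySem.List.pyGetD ((g.map (fun p => p.2)).map (fun x => pvCnt cols x)) ((0 : Int) + (m : Int)) 0
        = pvCnt cols (g[m].2) := by
      rw [zero_add, PySem.List.pyGetD_natCast]
      rw [List.getD_eq_getElem _ _ (by simpa using hm)]
      simp
    rw [hr, hc]
    rfl
  · rw [List.getElem?_eq_none (by simpa using Nat.le_of_not_lt hm),
        List.getElem?_eq_none (by simpa using Nat.le_of_not_lt hm)]

-- ===== VERDICT (by name: the statement is the Claim_ definition above) =====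
theorem update_galaxies_positions_spec : Claim_equal_update_galaxies_positions := by
  intro g rows cols _
  unfold Spec_update_galaxies_positions
  rw [pvA_eq, pvAlt_eq]
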